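-- pv_equiv track=rewrite | github.com/sarikiras/matrice-word-searches | reconstitution.py | rassemblement
-- ===== SOURCE A (Python) =====
-- def rassemblement(grid_inf, grid_sup):
--
--     n = len(grid_inf)
--     new_grid = [['' for i in range(n)] for _ in range(n)]
--
--     for i in range(n):
--         for j in range(n):
--             if i <= j:
--                 new_grid[i][j] = grid_sup[i][j]
--             else:
--                 new_grid[i][j] = grid_inf[i][j]
--     return new_grid
-- ===== SOURCE B (Python) =====
-- def rassemblement(grid_inf, grid_sup):
--     n = len(grid_inf)
--     return [inf[:i] + sup[i:n] for i, (inf, sup) in enumerate(zip(grid_inf, grid_sup))]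
-- ===== Notes on version B (the rewrite author's own statement) =====
-- stated objective: idiomatic
-- what changed: Replaces the preallocated n*n grid filled by nested index loops with a per-cell i<=j branch by a single comprehension over enumerate(zip(grid_inf, grid_sup)) that concatenates row slices inf[:i] + sup[i:n]; there is no inner loop, no index arithmetic and no conditional.
import Mathlib
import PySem

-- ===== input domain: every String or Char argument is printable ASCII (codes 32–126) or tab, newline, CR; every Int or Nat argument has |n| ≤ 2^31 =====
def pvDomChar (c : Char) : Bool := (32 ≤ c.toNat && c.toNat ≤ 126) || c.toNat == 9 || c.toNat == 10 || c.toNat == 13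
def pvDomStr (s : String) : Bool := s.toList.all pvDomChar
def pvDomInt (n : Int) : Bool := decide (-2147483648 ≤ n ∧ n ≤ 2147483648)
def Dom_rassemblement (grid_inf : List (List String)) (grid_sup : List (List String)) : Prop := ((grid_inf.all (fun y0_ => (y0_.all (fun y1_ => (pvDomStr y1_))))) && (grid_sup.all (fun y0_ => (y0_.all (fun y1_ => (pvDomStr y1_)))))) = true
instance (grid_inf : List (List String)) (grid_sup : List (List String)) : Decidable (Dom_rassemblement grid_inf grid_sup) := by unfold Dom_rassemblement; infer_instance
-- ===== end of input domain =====

-- B rebuilds the grid by zipping the two matrices and slicing each row pair (inf[:i] + sup[i:n])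
-- instead of A's preallocated n×n grid filled cell by cell under an i<=j branch; same cost, no inner loop.

-- ===== PORT A =====
-- Literal port of A: preallocate an n×n grid of "", then for i in range(n), for j in range(n),
-- set cell (i, j) from grid_sup or grid_inf according to i ≤ j.  Python's grid[i][j] raises
-- IndexError out of range; inside Pre_ every index read here is in range, so getD is exact there.
def rassemblement (grid_inf : List (List String)) (grid_sup : List (List String)) : List (List String) :=
  let n := grid_inf.length
  let new_grid := List.replicate n (List.replicate n "")
  (List.range n).foldl (fun g i =>
    (List.range n).foldl (fun g j =>
      let v := if i ≤ j then (grid_sup.getD i []).getD j "" else (grid_inf.getD i []).getD j ""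
      g.set i ((g.getD i []).set j v)) g) new_grid

-- ===== PORT B =====
-- Port of Source B: comprehension over enumerate(zip(grid_inf, grid_sup)); each row is inf[:i] + sup[i:n].
-- zip stops at the shorter list (the two base cases); the slices have nonnegative bounds i ≤ n,
-- so take/drop are exact for them.
def altRows (n : Nat) : Nat → List (List String) → List (List String) → List (List String)
  | _, [], _ => []
  | _, _ :: _, [] => []
  | i, inf :: infs, sup :: sups => (inf.take i ++ (sup.take n).drop i) :: altRows n (i + 1) infs sups

def rassemblement_alt (grid_inf : List (List String)) (grid_sup : List (List String)) : List (List String) :=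
  altRows grid_inf.length 0 grid_inf grid_sup

-- ===== PRECONDITION & SPEC =====
-- Pre_ is exactly A's non-raising domain: grid_sup has at least n = len(grid_inf) rows, row i of
-- grid_inf has length ≥ i (cells j < i are read) and row i of grid_sup has length ≥ n (cells j ≥ i).
def Pre_rassemblement (grid_inf : List (List String)) (grid_sup : List (List String)) : Prop :=
  grid_inf.length ≤ grid_sup.length ∧
  ∀ i < grid_inf.length, i ≤ (grid_inf.getD i []).length ∧ grid_inf.length ≤ (grid_sup.getD i []).length
instance (grid_inf : List (List String)) (grid_sup : List (List String)) : Decidable (Pre_rassemblement grid_inf grid_sup) := by unfold Pre_rassemblement; infer_instance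

def pvWitness_rassemblement : List (List String) × List (List String) :=
  ([["a", "b"], ["c", "d"]], [["w", "x"], ["y", "z"]])

def Spec_rassemblement (grid_inf : List (List String)) (grid_sup : List (List String)) (out : List (List String)) : Prop := out = rassemblement_alt grid_inf grid_sup
instance (grid_inf : List (List String)) (grid_sup : List (List String)) (out : List (List String)) : Decidable (Spec_rassemblement grid_inf grid_sup out) := by unfold Spec_rassemblement; infer_instance

-- ===== CLAIM (what is proved, stated in full; the proofs are below) =====
def Claim_equal_rassemblement : Prop := ∀ (grid_inf : List (List String)) (grid_sup : List (List String)), Dom_rassemblement grid_inf grid_sup → Pre_rassemblement grid_inf grid_sup → Spec_rassemblement grid_inf grid_sup (rassemblement grid_inf grid_sup)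

-- ===== LEMMAS AND PROOFS =====

-- The common normal form: row i of the merged grid.
def pvRow (grid_inf grid_sup : List (List String)) (n i : Nat) : List String :=
  (List.range n).map (fun j => if i ≤ j then (grid_sup.getD i []).getD j "" else (grid_inf.getD i []).getD j "")

-- A's inner loop only rewrites row i.
lemma inner_fold (v : Nat → String) (L : List Nat) (i : Nat) :
    ∀ (g : List (List String)), i < g.length →
    L.foldl (fun g j => g.set i ((g.getD i []).set j (v j))) g
      = g.set i (L.foldl (fun row j => row.set j (v j)) (g.getD i [])) := by
  induction L with
  | nil =>
    intro g hi
    simp only [List.foldl_nil]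
    rw [List.getD_eq_getElem _ _ hi, List.set_getElem_self hi]
  | cons j L ih =>
    intro g hi
    simp only [List.foldl_cons]
    rw [ih _ (by simpa using hi)]
    rw [List.getD_eq_getElem _ _ (show i < (g.set i ((g.getD i []).set j (v j))).length by simpa using hi)]
    rw [List.getElem_set_self, List.set_set]

-- Filling indices 0..m-1 of a list by set.
lemma fill_fold (v : Nat → String) (start : List String) :
    ∀ m, m ≤ start.length →
    (List.range m).foldl (fun (l : List String) j => l.set j (v j)) start
      = ((List.range m).map v) ++ start.drop m := by
  intro m
  induction m with
  | zero => simp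
  | succ m ih =>
    intro hm
    have hm' : m ≤ start.length := by omega
    have hlt : m < start.length := by omega
    rw [List.range_succ, List.foldl_append, ih hm']
    simp only [List.foldl_cons, List.foldl_nil]
    rw [List.set_append_right _ _ (by simp)]
    have h0 : m - (List.map v (List.range m)).length = 0 := by simp
    rw [h0, List.drop_eq_getElem_cons hlt, List.set_cons_zero]
    simp

-- A's outer loop replaces the blank rows one by one with the finished rows.
lemma outer_fold (n : ℕ) (w : ℕ → ℕ → String) :
    ∀ m, m ≤ n →
    (List.range m).foldl (fun g i => (List.range n).foldl
        (fun g j => g.set i ((g.getD i []).set j (w i j))) g)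
      (List.replicate n (List.replicate n ""))
    = ((List.range m).map (fun i => (List.range n).map (w i)))
        ++ (List.replicate n (List.replicate n "")).drop m := by
  intro m
  induction m with
  | zero => simp
  | succ m ih =>
    intro hm
    have hm' : m ≤ n := by omega
    rw [List.range_succ, List.foldl_append, ih hm']
    simp only [List.foldl_cons, List.foldl_nil]
    rw [inner_fold (w m) _ m _ (by simp; omega)]
    have hget : (List.map (fun i => (List.range n).map (w i)) (List.range m)
        ++ (List.replicate n (List.replicate n "")).drop m).getD m [] = List.replicate n "" := by
      rw [List.getD_eq_getElem?_getD, List.getElem?_append_right (by simp)]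
      have h0' : m - (List.map (fun i => (List.range n).map (w i)) (List.range m)).length = 0 := by simp
      rw [h0', List.drop_replicate, List.getElem?_replicate, if_pos (by omega)]
      rfl
    rw [hget, fill_fold (w m) _ n (by simp)]
    simp only [List.drop_replicate, Nat.sub_self, List.replicate_zero, List.append_nil]
    rw [List.set_append_right _ _ (by simp)]
    have h0 : m - (List.map (fun i => (List.range n).map (w i)) (List.range m)).length = 0 := by simp
    have hsplit : List.replicate (n - m) (List.replicate n "" : List String)
        = (List.replicate n "") :: List.replicate (n - (m + 1)) (List.replicate n "") := by
      have hnm : n - m = (n - (m + 1)) + 1 := by omega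
      rw [hnm, List.replicate_succ]
    rw [h0, hsplit, List.set_cons_zero]
    simp

-- A computes the normal form row by row.
lemma a_eq_rows (grid_inf grid_sup : List (List String)) :
    rassemblement grid_inf grid_sup
      = (List.range grid_inf.length).map (pvRow grid_inf grid_sup grid_inf.length) := by
  have := outer_fold grid_inf.length
      (fun i j => if i ≤ j then (grid_sup.getD i []).getD j "" else (grid_inf.getD i []).getD j "")
      grid_inf.length (le_refl _)
  simpa [rassemblement, pvRow] using this

-- One B row (two slices concatenated) equals the normal-form row.
lemma row_eq (n i : ℕ) (inf sup : List String)
    (hin : i ≤ inf.length) (hsn : n ≤ sup.length) (hi : i < n) :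
    inf.take i ++ (sup.take n).drop i
      = (List.range n).map (fun j => if i ≤ j then sup.getD j "" else inf.getD j "") := by
  have htake : (inf.take i).length = i := by simp; omega
  apply List.ext_getElem
  · simp; omega
  · intro k hk1 hk2
    simp only [List.length_map, List.length_range] at hk2
    by_cases hcase : k < i
    · rw [List.getElem_append_left (by omega)]
      simp [List.getD, List.getElem?_eq_getElem (show k < inf.length by omega), Nat.not_le.mpr hcase]
    · rw [List.getElem_append_right (by omega)]
      have hik : i ≤ k := by omega
      simp [htake, List.getD, hik, List.getElem?_eq_getElem (show k < sup.length by omega)]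

-- B computes the same rows, by induction on the remaining suffixes.
lemma b_eq_rows (grid_inf grid_sup : List (List String))
    (hpre : Pre_rassemblement grid_inf grid_sup) :
    ∀ k i, i ≤ grid_inf.length → k = grid_inf.length - i →
    altRows grid_inf.length i (grid_inf.drop i) (grid_sup.drop i)
      = (List.range' i k).map (pvRow grid_inf grid_sup grid_inf.length) := by
  obtain ⟨hlen, hrows⟩ := hpre
  intro k
  induction k with
  | zero =>
    intro i hi hk
    have : i = grid_inf.length := by omega
    subst this
    simp [altRows]
  | succ k ih =>
    intro i hi hk
    have hlt : i < grid_inf.length := by omega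
    have hlt' : i < grid_sup.length := by omega
    rw [List.drop_eq_getElem_cons hlt, List.drop_eq_getElem_cons hlt']
    show (grid_inf[i].take i ++ (grid_sup[i].take grid_inf.length).drop i)
        :: altRows grid_inf.length (i + 1) (grid_inf.drop (i + 1)) (grid_sup.drop (i + 1)) = _
    rw [ih (i + 1) (by omega) (by omega), List.range'_succ, List.map_cons]
    congr 1
    obtain ⟨h1, h2⟩ := hrows i hlt
    rw [List.getD_eq_getElem _ _ hlt] at h1
    rw [List.getD_eq_getElem _ _ hlt'] at h2
    rw [row_eq grid_inf.length i grid_inf[i] grid_sup[i] h1 h2 hlt]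
    simp [pvRow, List.getD, List.getElem?_eq_getElem hlt, List.getElem?_eq_getElem hlt']

-- ===== VERDICT (by name: the statement is the Claim_ definition above) =====
theorem rassemblement_spec : Claim_equal_rassemblement := by
  intro grid_inf grid_sup _hdom hpre
  unfold Spec_rassemblement rassemblement_alt
  rw [a_eq_rows]
  have := b_eq_rows grid_inf grid_sup hpre (grid_inf.length - 0) 0 (by omega) rfl
  simp only [List.drop_zero, Nat.sub_zero] at this
  rw [this, List.range_eq_range']
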